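-- pv_equiv track=rewrite | github.com/DireHalflings/RotatingChessboard_python3 | rotatingChessBoard.py | chessNotation
-- ===== SOURCE A (Python) =====
-- def chessNotation(notation):
--
--     # -- split passed notation into list, then turn numbers into all 1s -- #
--     notations = notation.split('/')
--     notations = divideEmptySpaces(notations)
--
--     # -- initialize rotatedNotation list and compiledNotation string -- #
--     rotatedNotation = [""] * 8
--     compiledNotation = ""
--
--     # -- Create new rotatedNotation from notations list -- #
--     for row in notations:
--         i = 0
--         while i < 8:
--             rotatedNotation[i] += row[i]
--             i += 1
--
--     # -- Reverse rotatedNotation, and all notations to compiledNotation string -- #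
--     q = 0
--     while q < 8:
--         rotatedNotation[q] = addEmptySpaces(rotatedNotation[q])[::-1] # Reverse Notation [::-1] using extended slice syntax
--         compiledNotation += rotatedNotation[q] + '/'
--         q += 1
--
--     # -- return compiledNotation string -- #
--     return compiledNotation[:-1]
--
-- def divideEmptySpaces(notations):
--     parsedNotations = []
--
--     for row in notations:
--
--         addedRow = ""
--
--         for square in row:
--
--             if square.isalpha():
--                 addedRow += square
--
--             if not square.isalpha():
--                 i = 0
--                 while i < int(square):
--                     addedRow += "1"
--                     i += 1
--         parsedNotations.append(addedRow)
--
--     return parsedNotations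
--
-- def addEmptySpaces (row):
--     addedRow = ""
--     emptySpaceCount = 0
--
--     for square in row:
--         if square.isalpha():
--             if emptySpaceCount != 0:
--                 addedRow += str(emptySpaceCount)
--                 emptySpaceCount = 0
--             addedRow += square
--
--         if not square.isalpha():
--             emptySpaceCount += 1
--
--     if not row[-1].isalpha():
--         addedRow += str(emptySpaceCount)
--
--     return addedRow
-- ===== SOURCE B (Python) =====
-- # Idiomatic rewrite: parse into an explicit 8-column transpose via indexing, and
-- # serialize each column with a run-skipping recursive compressor instead of A's
-- # flush-on-the-fly counter loops; same return value wherever A returns.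
--
-- def _expand(row):
--     out = ""
--     for c in row:
--         out += c if c.isalpha() else "1" * int(c)
--     return out
--
-- def _compress(s):
--     if s == "":
--         return ""
--     if s[0].isalpha():
--         return s[0] + _compress(s[1:])
--     n = 1
--     while n < len(s) and not s[n].isalpha():
--         n += 1
--     return str(n) + _compress(s[n:])
--
-- def chessNotation(notation):
--     rows = [_expand(r) for r in notation.split('/')]
--     cols = [''.join(row[q] for row in rows) for q in range(8)]
--     return '/'.join(_compress(c)[::-1] for c in cols)
-- ===== Notes on version B (the rewrite author's own statement) =====
-- stated objective: idiomatic
-- what changed: Replaces A's mutable 8-slot string accumulation and flush-on-the-fly run counters with an indexed transpose built by comprehensions and a recursive run-skipping compressor; output is identical wherever A returns.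
import Mathlib
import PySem

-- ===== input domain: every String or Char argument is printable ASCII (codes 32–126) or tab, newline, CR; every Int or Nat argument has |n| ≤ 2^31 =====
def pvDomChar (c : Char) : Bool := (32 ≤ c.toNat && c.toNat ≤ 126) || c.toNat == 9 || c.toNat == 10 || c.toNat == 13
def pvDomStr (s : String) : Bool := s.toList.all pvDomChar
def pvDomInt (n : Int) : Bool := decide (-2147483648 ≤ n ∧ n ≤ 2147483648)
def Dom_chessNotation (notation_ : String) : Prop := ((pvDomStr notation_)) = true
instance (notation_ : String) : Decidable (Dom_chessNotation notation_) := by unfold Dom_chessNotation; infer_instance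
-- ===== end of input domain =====

-- B replaces A's mutable 8-slot string accumulation and running empty-square counter with an
-- indexed transpose and a recursive run-skipping compressor (idiomatic rewrite, same values).
-- ===== PORT A =====

-- 'i = 0; while i < int(square): addedRow += "1"; i += 1'
def pvA_ones (i n : Int) : List Char :=
  if i < n then '1' :: pvA_ones (i + 1) n else []
termination_by (n - i).toNat
decreasing_by omega

-- body of the inner 'for square in row' of divideEmptySpaces (the two sequential ifs kept);
-- int(square) is PySem.Int.ofChars?, none = ValueError
def pvA_sq (a : List Char) (c : Char) : Option (List Char) :=
  let a1 := if PySem.Chars.isalpha c then a ++ [c] else a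
  if PySem.Chars.isalpha c then some a1
  else (PySem.Int.ofChars? [c]).map (fun n => a1 ++ pvA_ones 0 n)

def pvA_row (row : List Char) : Option (List Char) :=
  row.foldl (fun acc c => acc.bind (fun a => pvA_sq a c)) (some [])

-- divideEmptySpaces: loop appending parsed rows
def pvA_divide (rows : List (List Char)) : Option (List (List Char)) :=
  rows.foldl (fun acc r => acc.bind (fun l => (pvA_row r).map (fun e => l ++ [e]))) (some [])

-- 'i = 0; while i < 8: rotatedNotation[i] += row[i]; i += 1'; row[i] none = IndexError
def pvA_fill (row : List Char) (i : Nat) (rot : List (List Char)) : Option (List (List Char)) :=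
  if i < 8 then
    match PySem.List.pyGet? row (i : Int) with
    | some ch => pvA_fill row (i + 1) (rot.set i (rot.getD i [] ++ [ch]))
    | none => none
  else some rot
termination_by 8 - i

-- 'for row in notations: …' over rotatedNotation = [""] * 8
def pvA_rot (rows : List (List Char)) : Option (List (List Char)) :=
  rows.foldl (fun acc row => acc.bind (fun rot => pvA_fill row 0 rot)) (some (List.replicate 8 []))

-- body of the 'for square in row' of addEmptySpaces, state (addedRow, emptySpaceCount)
def pvA_addStep (p : List Char × Int) (c : Char) : List Char × Int :=
  let a1 := if PySem.Chars.isalpha c then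
      (if p.2 ≠ 0 then p.1 ++ PySem.Int.toChars p.2 else p.1) ++ [c]
    else p.1
  let c1 := if PySem.Chars.isalpha c then 0 else p.2 + 1
  (a1, c1)

-- addEmptySpaces; row[-1] is pyGet? · (-1), none = IndexError on the empty string
def pvA_add (col : List Char) : Option (List Char) :=
  let st := col.foldl pvA_addStep ([], 0)
  match PySem.List.pyGet? col (-1) with
  | some lc => some (if PySem.Chars.isalpha lc then st.1 else st.1 ++ PySem.Int.toChars st.2)
  | none => none

-- 'q = 0; while q < 8: rot[q] = addEmptySpaces(rot[q])[::-1]; compiled += rot[q] + "/"; q += 1'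
-- ([::-1] is reverse: PySem.List.slice?_none_none_neg_one)
def pvA_compile (rot : List (List Char)) (q : Nat) (comp : List Char) : Option (List Char) :=
  if q < 8 then
    match pvA_add (rot.getD q []) with
    | some s =>
      pvA_compile (rot.set q s.reverse) (q + 1) (comp ++ s.reverse ++ ['/'])
    | none => none
  else some comp
termination_by 8 - q

def chessNotation (notation_ : String) : String :=
  let rows := PySem.Chars.splitOn notation_.toList ['/']
  match pvA_divide rows with
  | none => ""          -- ValueError, outside Pre_
  | some parsed =>
    match pvA_rot parsed with
    | none => ""        -- IndexError, outside Pre_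
    | some rot =>
      match pvA_compile rot 0 [] with
      | none => ""      -- IndexError, outside Pre_
      | some comp => String.ofList (PySem.List.slice comp none (some (-1)))  -- compiled[:-1]

-- ===== PORT B =====

-- _expand body: 'out += c if c.isalpha() else "1" * int(c)'
def pvB_sq (out : List Char) (c : Char) : Option (List Char) :=
  if PySem.Chars.isalpha c then some (out ++ [c])
  else (PySem.Int.ofChars? [c]).map (fun n => out ++ PySem.List.pyRepeat ['1'] n)

def pvB_expand (row : List Char) : Option (List Char) :=
  row.foldl (fun acc c => acc.bind (fun out => pvB_sq out c)) (some [])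

-- 'n = 1; while n < len(s) and not s[n].isalpha(): n += 1' (started at any n)
def pvB_run (s : List Char) (n : Nat) : Nat :=
  if h : n < s.length then
    if PySem.Chars.isalpha s[n] then n else pvB_run s (n + 1)
  else n
termination_by s.length - n

-- needed for the termination of pvB_compress below
theorem pvB_run_ge (s : List Char) (n : Nat) : n ≤ pvB_run s n := by
  fun_induction pvB_run s n with
  | case1 => omega
  | case2 n hlt hal ih => exact le_trans (Nat.le_succ n) ih
  | case3 => omega

-- _compress, recursion on the suffix
def pvB_compress (s : List Char) : List Char :=
  match s with
  | [] => []
  | c :: cs =>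
    if PySem.Chars.isalpha c then c :: pvB_compress cs
    else
      let n := pvB_run (c :: cs) 1
      PySem.Int.toChars (n : Int) ++ pvB_compress ((c :: cs).drop n)
termination_by s.length
decreasing_by
  · simp
  · have h1 := pvB_run_ge (c :: cs) 1
    simp only [List.length_drop, List.length_cons]
    omega

-- cols = [''.join(row[q] for row in rows) for q in range(8)]
def pvB_cols (grid : List (List Char)) : Option (List (List Char)) :=
  (PySem.List.pyRange 0 8 1).foldl
    (fun acc q => acc.bind (fun cols =>
      (grid.foldl (fun c r =>
          c.bind (fun col => (PySem.List.pyGet? r q).map (fun ch => col ++ [ch]))) (some [])).map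
        (fun col => cols ++ [col])))
    (some [])

def chessNotation_alt (notation_ : String) : String :=
  let rows := PySem.Chars.splitOn notation_.toList ['/']
  match rows.foldl (fun acc r => acc.bind (fun l => (pvB_expand r).map (fun e => l ++ [e]))) (some []) with
  | none => ""          -- ValueError, outside Pre_
  | some grid =>
    match pvB_cols grid with
    | none => ""        -- IndexError, outside Pre_
    | some cols =>
      String.ofList (PySem.Chars.join ['/'] (cols.map (fun c => (pvB_compress c).reverse)))

-- ===== PRECONDITION & SPEC =====

-- one board square: a letter, or a character int() accepts (a digit)
def pvSqOk (c : Char) : Bool := PySem.Chars.isalpha c || (PySem.Int.ofChars? [c]).isSome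
-- how many squares the character expands to
def pvSqLen (c : Char) : Nat :=
  if PySem.Chars.isalpha c then 1 else ((PySem.Int.ofChars? [c]).getD 0).toNat

-- Pre_ = exactly the inputs where A returns: every square of every '/'-row is a letter or digit
-- (else int() raises ValueError) and every row expands to at least 8 squares (else row[i] raises
-- IndexError); A reads only the first 8 squares of longer rows, and any number of rows is fine.
def pvPreB (notation_ : String) : Bool :=
  (PySem.Chars.splitOn notation_.toList ['/']).all
    (fun r => r.all pvSqOk && decide (8 ≤ (r.map pvSqLen).sum))

def Pre_chessNotation (notation_ : String) : Prop := pvPreB notation_ = true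

instance (notation_ : String) : Decidable (Pre_chessNotation notation_) := by
  unfold Pre_chessNotation; infer_instance

def pvWitness_chessNotation : String := "8/8/8/8/8/8/8/8"

def Spec_chessNotation (notation_ : String) (out : String) : Prop := out = chessNotation_alt notation_
instance (notation_ : String) (out : String) : Decidable (Spec_chessNotation notation_ out) := by
  unfold Spec_chessNotation; infer_instance

-- ===== CLAIM (what is proved, stated in full; the proofs are below) =====
def Claim_equal_chessNotation : Prop := ∀ (notation_ : String), Dom_chessNotation notation_ → Pre_chessNotation notation_ → Spec_chessNotation notation_ (chessNotation notation_)

-- ===== LEMMAS AND PROOFS =====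

-- what one admissible square expands to
def pvPiece (c : Char) : List Char :=
  if PySem.Chars.isalpha c then [c]
  else List.replicate (((PySem.Int.ofChars? [c]).getD 0).toNat) '1'

-- the expansion of a row
def pvE (r : List Char) : List Char := r.flatMap pvPiece

theorem pvA_ones_eq (i n : Int) : pvA_ones i n = List.replicate (n - i).toNat '1' := by
  fun_induction pvA_ones i n
  case case1 i hlt ih =>
    rw [ih, show (n - i).toNat = (n - (i + 1)).toNat + 1 by omega, List.replicate_succ]
  case case2 i hlt =>
    rw [show (n - i).toNat = 0 by omega, List.replicate_zero]

-- generic: the append-style option fold succeeds elementwise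
theorem pvFoldSome {α β : Type} (l : List α) (f : α → Option β) (g : α → β)
    (h : ∀ x ∈ l, f x = some (g x)) (acc : List β) :
    l.foldl (fun a x => a.bind (fun ys => (f x).map (fun y => ys ++ [y]))) (some acc)
      = some (acc ++ l.map g) := by
  induction l generalizing acc with
  | nil => simp
  | cons x xs ih =>
    simp only [List.foldl_cons, h x (by simp), Option.bind_some, Option.map_some]
    rw [ih (fun y hy => h y (by simp [hy]))]
    simp

-- generic: the string-accumulator option fold appends pieces
theorem pvFoldAppend {α : Type} (l : List α) (step : List Char → α → Option (List Char))
    (h : α → List Char)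
    (hs : ∀ c ∈ l, ∀ a, step a c = some (a ++ h c)) (a0 : List Char) :
    l.foldl (fun acc c => acc.bind (fun a => step a c)) (some a0)
      = some (a0 ++ l.flatMap h) := by
  induction l generalizing a0 with
  | nil => simp
  | cons x xs ih =>
    simp only [List.foldl_cons, hs x (by simp), Option.bind_some]
    rw [ih (fun y hy a => hs y (by simp [hy]) a)]
    simp

theorem pvA_sq_eq (a : List Char) (c : Char) (hc : pvSqOk c = true) :
    pvA_sq a c = some (a ++ pvPiece c) := by
  unfold pvA_sq pvPiece
  by_cases hal : PySem.Chars.isalpha c = true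
  · simp [hal]
  · simp only [pvSqOk, hal, Bool.false_or] at hc
    obtain ⟨n, hn⟩ := Option.isSome_iff_exists.mp hc
    simp [hal, hn, pvA_ones_eq]

theorem pvB_sq_eq (a : List Char) (c : Char) (hc : pvSqOk c = true) :
    pvB_sq a c = some (a ++ pvPiece c) := by
  unfold pvB_sq pvPiece
  by_cases hal : PySem.Chars.isalpha c = true
  · simp [hal]
  · simp only [pvSqOk, hal, Bool.false_or] at hc
    obtain ⟨n, hn⟩ := Option.isSome_iff_exists.mp hc
    simp [hal, hn, PySem.List.pyRepeat_singleton]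

theorem pvA_row_eq (r : List Char) (hr : ∀ c ∈ r, pvSqOk c = true) :
    pvA_row r = some (pvE r) := by
  have := pvFoldAppend r (fun a c => pvA_sq a c) pvPiece
    (fun c hc a => pvA_sq_eq a c (hr c hc)) []
  simpa [pvA_row, pvE] using this

theorem pvB_expand_eq (r : List Char) (hr : ∀ c ∈ r, pvSqOk c = true) :
    pvB_expand r = some (pvE r) := by
  have := pvFoldAppend r (fun a c => pvB_sq a c) pvPiece
    (fun c hc a => pvB_sq_eq a c (hr c hc)) []
  simpa [pvB_expand, pvE] using this

theorem pvE_length (r : List Char) : (pvE r).length = (r.map pvSqLen).sum := by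
  induction r with
  | nil => rfl
  | cons c cs ih =>
    simp only [pvE, List.flatMap_cons, List.length_append, List.map_cons, List.sum_cons] at *
    rw [ih]
    congr 1
    unfold pvPiece pvSqLen
    split_ifs <;> simp

-- splitOn never returns []
theorem pvSplitGo_ne_nil (sep : List Char) (fuel : Nat) :
    ∀ l cur acc, PySem.Chars.splitOn.go sep fuel l cur acc ≠ [] := by
  induction fuel with
  | zero => intro l cur acc; rw [PySem.Chars.splitOn.go]; simp
  | succ fuel ih =>
    intro l cur acc
    cases l with
    | nil =>
      rw [PySem.Chars.splitOn.go]
      · simp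
      · omega
    | cons c rest =>
      rw [PySem.Chars.splitOn.go]
      split_ifs <;> exact ih _ _ _

theorem pvSplit_ne_nil (s sep : List Char) : PySem.Chars.splitOn s sep ≠ [] := by
  unfold PySem.Chars.splitOn
  exact pvSplitGo_ne_nil _ _ _ _ _

-- ---- transpose ----

theorem pvA_fill_eq (row : List Char) (hrow : 8 ≤ row.length) :
    ∀ (k : Nat) (rot : List (List Char)), rot.length = 8 →
    ∃ rot', pvA_fill row k rot = some rot' ∧ rot'.length = 8 ∧
      ∀ q, q < 8 →
        rot'.getD q [] = if k ≤ q then rot.getD q [] ++ [row.getD q ' '] else rot.getD q [] := by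
  intro k rot
  fun_induction pvA_fill row k rot
  case case1 k rot hk ch hget ih =>
    intro hlen
    obtain ⟨rot', h1, h2, h3⟩ := ih (by simp [hlen])
    refine ⟨rot', h1, h2, ?_⟩
    intro q hq
    rw [h3 q hq]
    have hch : row.getD k ' ' = ch := by
      rw [PySem.List.pyGet?_natCast] at hget
      simp [List.getD_eq_getElem?_getD, hget]
    have hset : ∀ j, j < 8 → (rot.set k (rot.getD k [] ++ [ch])).getD j [] =
        if k = j then rot.getD k [] ++ [ch] else rot.getD j [] := by
      intro j hj
      rw [List.getD_eq_getElem?_getD, List.getElem?_set]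
      by_cases he : k = j
      · simp [he, show j < rot.length by omega]
      · simp [he, List.getD_eq_getElem?_getD]
    by_cases hkq : k = q
    · subst hkq
      rw [if_neg (by omega), hset k hq, if_pos rfl, if_pos (le_refl k), hch]
    · rw [hset q hq, if_neg hkq]
      split_ifs with h1' h2' <;> first | rfl | omega
  case case2 k rot hk hget =>
    intro hlen
    exfalso
    rw [PySem.List.pyGet?_natCast, List.getElem?_eq_none_iff] at hget
    omega
  case case3 k rot hk =>
    intro hlen
    refine ⟨rot, rfl, hlen, ?_⟩
    intro q hq
    rw [if_neg (by omega)]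

theorem pvA_rotGo (rows : List (List Char)) :
    ∀ (rot : List (List Char)), rot.length = 8 → (∀ r ∈ rows, 8 ≤ r.length) →
    ∃ R, rows.foldl (fun acc row => acc.bind (fun rot => pvA_fill row 0 rot)) (some rot) = some R ∧
      R.length = 8 ∧
      ∀ q, q < 8 → R.getD q [] = rot.getD q [] ++ rows.map (fun r => r.getD q ' ') := by
  induction rows with
  | nil =>
    intro rot hlen _
    exact ⟨rot, rfl, hlen, fun q hq => by simp⟩
  | cons r rs ih =>
    intro rot hlen hall
    obtain ⟨rot1, h1, h2, h3⟩ := pvA_fill_eq r (hall r (by simp)) 0 rot hlen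
    obtain ⟨R, g1, g2, g3⟩ := ih rot1 h2 (fun x hx => hall x (by simp [hx]))
    refine ⟨R, ?_, g2, ?_⟩
    · simpa [h1] using g1
    · intro q hq
      rw [g3 q hq, h3 q hq, if_pos (Nat.zero_le q)]
      simp

theorem pvA_rot_eq (rows : List (List Char)) (h : ∀ r ∈ rows, 8 ≤ r.length) :
    ∃ R, pvA_rot rows = some R ∧ R.length = 8 ∧
      ∀ q, q < 8 → R.getD q [] = rows.map (fun r => r.getD q ' ') := by
  obtain ⟨R, h1, h2, h3⟩ := pvA_rotGo rows (List.replicate 8 []) (by simp) h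
  refine ⟨R, h1, h2, ?_⟩
  intro q hq
  rw [h3 q hq, List.getD_replicate _ hq]
  simp

-- ---- compression: A's counter fold = B's run-skipping recursion ----

theorem pvRun_eq (s : List Char) (k : Nat) (hk : k ≤ s.length) :
    pvB_run s k = k + ((s.drop k).takeWhile (fun x => !PySem.Chars.isalpha x)).length := by
  revert hk
  fun_induction pvB_run s k
  case case1 k hk hal =>
    intro _
    rw [← List.getElem_cons_drop hk, List.takeWhile_cons]
    simp [hal]
  case case2 k hk hal ih =>
    intro _
    rw [ih (by omega), ← List.getElem_cons_drop hk, List.takeWhile_cons]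
    simp only [hal, Bool.not_false, if_pos, List.length_cons]
    omega
  case case3 k hk =>
    intro hk2
    have : s.drop k = [] := List.drop_eq_nil_of_le (by omega)
    simp [this]

theorem pvAddRun (r : List Char) (hr : ∀ c ∈ r, PySem.Chars.isalpha c = false) :
    ∀ p : List Char × Int, List.foldl pvA_addStep p r = (p.1, p.2 + r.length) := by
  induction r with
  | nil => intro p; simp
  | cons c cs ih =>
    intro p
    have hc : PySem.Chars.isalpha c = false := hr c (by simp)
    rw [List.foldl_cons, show pvA_addStep p c = (p.1, p.2 + 1) by simp [pvA_addStep, hc],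
      ih (fun x hx => hr x (by simp [hx]))]
    simp
    omega

theorem pvDropWhile_head {α : Type} (p : α → Bool) (l : List α) (h : α) (t : List α)
    (he : l.dropWhile p = h :: t) : p h = false := by
  induction l with
  | nil => simp at he
  | cons x xs ih =>
    rw [List.dropWhile_cons] at he
    split_ifs at he with hp
    · exact ih he
    · injection he with h1 h2
      subst h1
      simpa using hp

theorem pvCompressMain (N : Nat) : ∀ s : List Char, s.length ≤ N → ∀ lc, s.getLast? = some lc →
    ∀ a : List Char,
      (let st := List.foldl pvA_addStep (a, 0) s
       if PySem.Chars.isalpha lc then st.1 else st.1 ++ PySem.Int.toChars st.2)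
        = a ++ pvB_compress s := by
  induction N with
  | zero =>
    intro s hs lc hlc a
    have hnil : s = [] := List.eq_nil_of_length_eq_zero (by omega)
    subst hnil
    simp at hlc
  | succ N ih =>
    intro s hs lc hlc a
    match s with
    | [] => simp at hlc
    | c :: cs =>
      by_cases hal : PySem.Chars.isalpha c = true
      · -- letter at the head: A flushes nothing (count 0) and both append c
        have hstep : List.foldl pvA_addStep (a, 0) (c :: cs)
            = List.foldl pvA_addStep (a ++ [c], 0) cs := by
          simp [pvA_addStep, hal]
        have hcomp : pvB_compress (c :: cs) = c :: pvB_compress cs := by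
          rw [pvB_compress, if_pos hal]
        cases cs with
        | nil =>
          have hlcc : c = lc := by simpa using hlc
          subst hlcc
          simp [hstep, hcomp, hal, pvB_compress]
        | cons d t =>
          have hlc' : (d :: t).getLast? = some lc := by
            rwa [List.getLast?_cons_cons] at hlc
          have hih := ih (d :: t) (by simp at hs ⊢; omega) lc hlc' (a ++ [c])
          simp only at hih ⊢
          rw [hstep, hcomp, hih]
          simp
      · -- a run of empties at the head
        have hal' : PySem.Chars.isalpha c = false := by simpa using hal
        have hsplit : cs.takeWhile (fun x => !PySem.Chars.isalpha x)
            ++ cs.dropWhile (fun x => !PySem.Chars.isalpha x) = cs :=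
          List.takeWhile_append_dropWhile
        set t := cs.takeWhile (fun x => !PySem.Chars.isalpha x) with ht
        set d := cs.dropWhile (fun x => !PySem.Chars.isalpha x) with hd
        have htall : ∀ x ∈ c :: t, PySem.Chars.isalpha x = false := by
          intro x hx
          rcases List.mem_cons.mp hx with h | h
          · subst h; exact hal'
          · have := List.mem_takeWhile_imp (ht ▸ h)
            simpa using this
        have hrun : pvB_run (c :: cs) 1 = 1 + t.length := by
          rw [pvRun_eq (c :: cs) 1 (by simp)]
          simp [ht]
        have hdrop : (c :: cs).drop (1 + t.length) = d := by
          rw [show (1 + t.length) = t.length + 1 by omega, List.drop_succ_cons,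
            ← hsplit, List.drop_left]
        have hcomp : pvB_compress (c :: cs)
            = PySem.Int.toChars ((1 + t.length : Nat) : Int) ++ pvB_compress d := by
          rw [pvB_compress, if_neg hal]
          simp only [hrun, hdrop]
        have hccs : c :: cs = (c :: t) ++ d := by
          rw [List.cons_append, hsplit]
        have hfold : List.foldl pvA_addStep (a, 0) (c :: cs)
            = List.foldl pvA_addStep (a, (0 : Int) + ((c :: t).length : Int)) d := by
          conv_lhs => rw [hccs]
          rw [List.foldl_append, pvAddRun (c :: t) htall]
        have hm : (0 : Int) + ((c :: t).length : Int) = ((1 + t.length : Nat) : Int) := by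
          simp
          omega
        cases hd2 : d with
        | nil =>
          -- the whole string is one run of empties: the final flush writes the count
          have hlcm : PySem.Chars.isalpha lc = false := by
            obtain ⟨ys, hys⟩ := List.getLast?_eq_some_iff.mp hlc
            have hmem : lc ∈ c :: cs := by rw [hys]; simp
            have : c :: cs = c :: t := by rw [hccs, hd2]; simp
            exact htall lc (this ▸ hmem)
          simp only [hfold, hd2, List.foldl_nil, hcomp]
          rw [if_neg (by simp [hlcm]), hm]
          simp [pvB_compress]
        | cons h d' =>
          have halh : PySem.Chars.isalpha h = true := by
            have := pvDropWhile_head (fun x => !PySem.Chars.isalpha x) cs h d' (hd ▸ hd2)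
            simpa using this
          have hmne : ((0 : Int) + ((c :: t).length : Int)) ≠ 0 := by
            simp only [List.length_cons]
            omega
          have hswap : List.foldl pvA_addStep (a, (0 : Int) + ((c :: t).length : Int)) (h :: d')
              = List.foldl pvA_addStep
                  (a ++ PySem.Int.toChars ((0 : Int) + ((c :: t).length : Int)), 0) (h :: d') := by
            rw [List.foldl_cons, List.foldl_cons]
            congr 1
            simp [pvA_addStep, halh]
            rw [if_neg (by omega)]
            simp
          have hlcd : (h :: d').getLast? = some lc := by
            have hne : (h :: d').getLast? ≠ none := by simp
            obtain ⟨x, hx⟩ := Option.ne_none_iff_exists'.mp hne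
            rw [hccs, hd2, List.getLast?_append, hx, Option.some_or] at hlc
            rw [hx, hlc]
          have hdlen : (h :: d').length ≤ N := by
            have h1 : d.length ≤ cs.length := hd ▸ List.length_dropWhile_le _ cs
            rw [hd2] at h1
            simp at hs
            omega
          have hih := ih (h :: d') hdlen lc hlcd
            (a ++ PySem.Int.toChars ((0 : Int) + ((c :: t).length : Int)))
          simp only at hih ⊢
          rw [hfold, hd2, hswap, hih, hcomp, hm, hd2]
          simp

theorem pvA_add_eq (col : List Char) (h : col ≠ []) :
    pvA_add col = some (pvB_compress col) := by
  obtain ⟨lc, hlc⟩ : ∃ lc, col.getLast? = some lc := by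
    cases hcl : col.getLast? with
    | none => exact absurd (List.getLast?_eq_none_iff.mp hcl) h
    | some x => exact ⟨x, rfl⟩
  have hmain := pvCompressMain col.length col le_rfl lc hlc []
  simp only at hmain
  unfold pvA_add
  rw [PySem.List.pyGet?_neg_one, hlc]
  simp [hmain]

-- ---- compile loop ----

theorem pvA_compile_eq (colF : Nat → List Char) (hne : ∀ j, j < 8 → colF j ≠ []) :
    ∀ (k : Nat) (rot : List (List Char)) (comp : List Char), rot.length = 8 →
    (∀ j, k ≤ j → j < 8 → rot.getD j [] = colF j) →
    pvA_compile rot k comp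
      = some (comp ++ (((List.range' k (8 - k)).map (fun j => (pvB_compress (colF j)).reverse)).flatMap
          (fun x => x ++ ['/']))) := by
  intro k rot comp
  fun_induction pvA_compile rot k comp
  case case1 rot k comp hk s5 hadd ih =>
    intro hlen hcol
    have hc : rot.getD k [] = colF k := hcol k le_rfl hk
    have hs5 : s5 = pvB_compress (colF k) := by
      rw [hc, pvA_add_eq (colF k) (hne k hk)] at hadd
      exact (Option.some_inj.mp hadd).symm
    rw [ih (by simp [hlen]) ?_]
    · subst hs5
      rw [show 8 - k = (8 - (k + 1)) + 1 by omega, List.range'_succ, List.map_cons,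
        List.flatMap_cons]
      simp
    · intro j hj1 hj2
      rw [List.getD_eq_getElem?_getD, List.getElem?_set, if_neg (by omega),
        ← List.getD_eq_getElem?_getD]
      exact hcol j (by omega) hj2
  case case2 rot k comp hk hadd =>
    intro hlen hcol
    rw [hcol k le_rfl hk, pvA_add_eq (colF k) (hne k hk)] at hadd
    cases hadd
  case case3 rot k comp hk =>
    intro hlen hcol
    rw [show 8 - k = 0 by omega]
    simp

-- ---- join / dropLast ----

theorem pvJoinDrop (L : List (List Char)) (h : L ≠ []) :
    (L.flatMap (fun x => x ++ ['/'])).dropLast = PySem.Chars.join ['/'] L := by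
  induction L with
  | nil => exact absurd rfl h
  | cons x ys ih =>
    cases ys with
    | nil =>
      rw [PySem.Chars.join_singleton]
      simp
    | cons y t =>
      rw [List.flatMap_cons, PySem.Chars.join_cons_cons, ← ih (by simp)]
      rw [List.dropLast_append_of_ne_nil (by simp)]

-- ---- B's column comprehension ----

theorem pvB_cols_eq (grid : List (List Char)) (h : ∀ r ∈ grid, 8 ≤ r.length) :
    pvB_cols grid = some ((List.range' 0 8).map (fun q => grid.map (fun r => r.getD q ' '))) := by
  have hinner : ∀ q : Int, 0 ≤ q → q < 8 →
      grid.foldl (fun c r =>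
          c.bind (fun col => (PySem.List.pyGet? r q).map (fun ch => col ++ [ch]))) (some [])
        = some (grid.map (fun r => r.getD q.toNat ' ')) := by
    intro q hq0 hq8
    have := pvFoldSome grid (fun r => PySem.List.pyGet? r q) (fun r => r.getD q.toNat ' ')
      (fun r hr => by
        show PySem.List.pyGet? r q = some (r.getD q.toNat ' ')
        rw [PySem.List.pyGet?_of_nonneg r hq0]
        have hlt : q.toNat < r.length := by have := h r hr; omega
        rw [List.getElem?_eq_getElem hlt, List.getD_eq_getElem _ _ hlt]) []
    simpa using this
  have houter := pvFoldSome (PySem.List.pyRange 0 8 1)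
    (fun q => grid.foldl (fun c r =>
        c.bind (fun col => (PySem.List.pyGet? r q).map (fun ch => col ++ [ch]))) (some []))
    (fun q => grid.map (fun r => r.getD q.toNat ' '))
    (fun q hq => hinner q
      (by rw [show PySem.List.pyRange 0 8 1 = [0,1,2,3,4,5,6,7] from by decide] at hq; fin_cases hq <;> norm_num)
      (by rw [show PySem.List.pyRange 0 8 1 = [0,1,2,3,4,5,6,7] from by decide] at hq; fin_cases hq <;> norm_num)) []
  unfold pvB_cols
  rw [houter]
  rw [show PySem.List.pyRange 0 8 1 = [0,1,2,3,4,5,6,7] from by decide,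
    show List.range' 0 8 = [0,1,2,3,4,5,6,7] from by decide]
  simp

-- ===== VERDICT (by name: the statement is the Claim_ definition above) =====
theorem chessNotation_spec : Claim_equal_chessNotation := by
  intro s hDom hPre
  unfold Spec_chessNotation chessNotation chessNotation_alt
  set rows := PySem.Chars.splitOn s.toList ['/'] with hrows
  have hPre' : ∀ r ∈ rows, (∀ c ∈ r, pvSqOk c = true) ∧ 8 ≤ (r.map pvSqLen).sum := by
    intro r hr
    have hall := List.all_eq_true.mp hPre r hr
    rw [Bool.and_eq_true] at hall
    obtain ⟨h1, h2⟩ := hall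
    exact ⟨List.all_eq_true.mp h1, of_decide_eq_true h2⟩
  have hok : ∀ r ∈ rows, ∀ c ∈ r, pvSqOk c = true := fun r hr => (hPre' r hr).1
  have hElen : ∀ r ∈ rows, 8 ≤ (pvE r).length := by
    intro r hr
    rw [pvE_length]
    exact (hPre' r hr).2
  have hdiv : pvA_divide rows = some (rows.map pvE) := by
    have := pvFoldSome rows pvA_row pvE (fun r hr => pvA_row_eq r (hok r hr)) []
    simpa [pvA_divide] using this
  have hB : rows.foldl (fun acc r => acc.bind (fun l => (pvB_expand r).map (fun e => l ++ [e])))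
      (some []) = some (rows.map pvE) := by
    have := pvFoldSome rows pvB_expand pvE (fun r hr => pvB_expand_eq r (hok r hr)) []
    simpa using this
  set grid := rows.map pvE with hgrid
  have hg8 : ∀ e ∈ grid, 8 ≤ e.length := by
    intro e he
    obtain ⟨r, hr, rfl⟩ := List.mem_map.mp he
    exact hElen r hr
  have hgne : grid ≠ [] := by
    intro hc
    exact pvSplit_ne_nil s.toList ['/'] (by simpa [hgrid] using hc)
  obtain ⟨R, hR1, hR2, hR3⟩ := pvA_rot_eq grid hg8
  have hcolne : ∀ j, j < 8 → grid.map (fun r => r.getD j ' ') ≠ [] := by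
    intro j hj hc
    exact hgne (List.map_eq_nil_iff.mp hc)
  have hcomp := pvA_compile_eq (fun j => grid.map (fun r => r.getD j ' ')) hcolne 0 R [] hR2
    (fun j h0 hj => hR3 j hj)
  have hcols := pvB_cols_eq grid hg8
  simp only [hdiv, hB, hR1, hcomp, hcols]
  rw [PySem.List.slice_to_neg_one]
  rw [List.nil_append, pvJoinDrop _ (by simp)]
  rw [show (8 - 0 : Nat) = 8 from rfl, List.map_map]
  rfl
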